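-- pv_equiv track=rewrite | github.com/meezlung/python-dump | CS 12/prac4/cs12232prac04c.py | sort_parcels
-- ===== SOURCE A (Python) =====
-- from typing import Sequence, TypeVar
--
-- I = TypeVar("I", bound = int | str | tuple[int, int])
--
-- P = TypeVar("P")
--
-- def sort_parcels(orders: Sequence[tuple[I, P]]) -> dict[I, list[P]]:
--     sorted_orders: dict[I, list[P]] = {}
--
--     for order in orders:
--         if order[0] in sorted_orders:
--             sorted_orders[order[0]].append(order[1])
--         else:
--             sorted_orders[order[0]] = [order[1]]
--
--     return dict(sorted(sorted_orders.items()))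
-- ===== SOURCE B (Python) =====
-- def sort_parcels(orders):
--     ordered = sorted(orders, key=lambda o: o[0])
--     result = {}
--     i = 0
--     while i < len(ordered):
--         k = ordered[i][0]
--         j = i + 1
--         while j < len(ordered) and ordered[j][0] == k:
--             j += 1
--         result[k] = [o[1] for o in ordered[i:j]]
--         i = j
--     return result
-- ===== Notes on version B (the rewrite author's own statement) =====
-- stated objective: idiomatic
-- what changed: Replaces A's hash-group-then-sort-the-items with a stable sort by key followed by one linear pass that emits each consecutive run of equal keys, so the dict is built directly in sorted key order.
import Mathlib
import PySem

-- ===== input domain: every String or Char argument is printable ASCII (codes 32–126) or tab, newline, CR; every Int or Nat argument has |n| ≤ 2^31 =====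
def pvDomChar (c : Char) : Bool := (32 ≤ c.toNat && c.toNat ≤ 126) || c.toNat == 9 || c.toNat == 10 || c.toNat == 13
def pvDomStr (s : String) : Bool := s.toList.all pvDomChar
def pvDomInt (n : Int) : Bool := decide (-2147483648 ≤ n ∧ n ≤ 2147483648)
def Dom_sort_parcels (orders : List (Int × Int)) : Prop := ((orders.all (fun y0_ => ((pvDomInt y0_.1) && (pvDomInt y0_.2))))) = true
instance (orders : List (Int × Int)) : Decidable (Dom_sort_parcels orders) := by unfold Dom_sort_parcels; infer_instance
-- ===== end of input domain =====

-- B replaces A's hash-group-then-sort-the-items with a stable sort by key followed by one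
-- linear run-emitting pass (dict built directly in sorted key order); same return value.


-- ===== PORT A =====
-- dict built by the loop (append if key present, else fresh singleton), then
-- sorted(d.items()); the dict's keys are distinct, so Python's tuple comparison
-- in that sort is decided by the key alone — ported as a key-by-fst sort.
def sort_parcels (orders : List (Int × Int)) : List (Int × List Int) :=
  let d := orders.foldl
    (fun d o =>
      if d.contains o.1 then d.modify o.1 [] (fun l => l ++ [o.2])
      else d.insert o.1 [o.2])
    PySem.Dict.empty
  PySem.List.sorted d.items (fun p => p.1)

-- ===== PORT B =====
-- the inner while loop of Source B: peel off the run of the head's key, emit it, continue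
def pvRuns : List (Int × Int) → List (Int × List Int)
  | [] => []
  | o :: rest =>
    (o.1, (o :: rest.takeWhile (fun p => p.1 == o.1)).map Prod.snd)
      :: pvRuns (rest.dropWhile (fun p => p.1 == o.1))
termination_by l => l.length
decreasing_by
  simp only [List.length_cons]
  have := List.length_dropWhile_le (fun p : Int × Int => p.1 == o.1) rest
  omega

def sort_parcels_alt (orders : List (Int × Int)) : List (Int × List Int) :=
  pvRuns (PySem.List.sorted orders (fun o => o.1))

-- ===== PRECONDITION & SPEC =====
def Spec_sort_parcels (orders : List (Int × Int)) (out : List (Int × List Int)) : Prop := out = sort_parcels_alt orders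
instance (orders : List (Int × Int)) (out : List (Int × List Int)) : Decidable (Spec_sort_parcels orders out) := by unfold Spec_sort_parcels; infer_instance

-- ===== CLAIM (what is proved, stated in full; the proofs are below) =====
def Claim_equal_sort_parcels : Prop := ∀ (orders : List (Int × Int)), Dom_sort_parcels orders → Spec_sort_parcels orders (sort_parcels orders)

-- ===== LEMMAS AND PROOFS =====

-- the common canonical row: a key paired with the second components of its group in l
def pvRow (l : List (Int × Int)) (k : Int) : Int × List Int :=
  (k, (l.filter (fun p => p.1 == k)).map Prod.snd)

-- A's loop body is extensionally the modify-with-append step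
theorem pv_stepA_eq (d : PySem.Dict Int (List Int)) (o : Int × Int) :
    (if d.contains o.1 then d.modify o.1 [] (fun l => l ++ [o.2]) else d.insert o.1 [o.2])
      = d.modify o.1 [] (fun l => l ++ [o.2]) := by
  by_cases h : d.contains o.1
  · simp [h]
  · simp [h, PySem.Dict.modify, PySem.Dict.getD_of_not_contains d [] (by simpa using h)]

theorem pv_update_sublist (xs : List Int) (s : PySem.Set Int) :
    (PySem.Set.update s xs).Sublist (s ++ xs) := by
  induction xs generalizing s with
  | nil => simp [PySem.Set.update]
  | cons x xs ih =>
    have h1 : (PySem.Set.update s (x :: xs)).Sublist (PySem.Set.add s x ++ xs) := by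
      simpa [PySem.Set.update, List.foldl_cons] using ih (PySem.Set.add s x)
    have h2 : (PySem.Set.add s x).Sublist (s ++ [x]) := by
      unfold PySem.Set.add
      split
      · exact List.sublist_append_left _ _
      · exact List.Sublist.refl _
    have := h1.trans (h2.append_right xs)
    simpa using this

theorem pv_update_all_mem (xs : List Int) (s : PySem.Set Int) (h : ∀ x ∈ xs, x ∈ s) :
    PySem.Set.update s xs = s := by
  induction xs generalizing s with
  | nil => rfl
  | cons x xs ih =>
    have hx : x ∈ s := h x (by simp)
    have hadd : PySem.Set.add s x = s := by simp [PySem.Set.add, hx]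
    simpa [PySem.Set.update, List.foldl_cons, hadd] using
      ih s (fun y hy => h y (by simp [hy]))

theorem pv_update_cons_out (x : Int) (ys : List Int) (s : PySem.Set Int) (hx : x ∉ ys) :
    PySem.Set.update (x :: s) ys = x :: PySem.Set.update s ys := by
  induction ys generalizing s with
  | nil => rfl
  | cons y ys ih =>
    have hyx : ¬ y = x := by rintro rfl; exact hx (by simp)
    have hadd : PySem.Set.add (x :: s) y = x :: PySem.Set.add s y := by
      by_cases hc : y ∈ s <;> simp [PySem.Set.add, hc, hyx]
    simpa [PySem.Set.update, List.foldl_cons, hadd] using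
      ih (PySem.Set.add s y) (fun h => hx (by simp [h]))

-- inserting an element whose key misses c leaves the c-filter unchanged
theorem pv_filter_insertBy_ne (x : Int × Int) (c : Int) (acc : List (Int × Int))
    (hx : ¬ x.1 = c) :
    (PySem.List.insertBy (fun a b : Int × Int => decide (a.1 < b.1)) x acc).filter
        (fun p => p.1 == c)
      = acc.filter (fun p => p.1 == c) := by
  induction acc with
  | nil => simp [PySem.List.insertBy, hx]
  | cons y ys ih =>
    by_cases hlt : x.1 < y.1
    · have hins : PySem.List.insertBy (fun a b : Int × Int => decide (a.1 < b.1)) x (y :: ys)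
          = x :: y :: ys := by simp [PySem.List.insertBy, hlt]
      rw [hins, List.filter_cons_of_neg (by simpa using hx)]
    · have hins : PySem.List.insertBy (fun a b : Int × Int => decide (a.1 < b.1)) x (y :: ys)
          = y :: PySem.List.insertBy (fun a b : Int × Int => decide (a.1 < b.1)) x ys := by
        simp [PySem.List.insertBy, hlt]
      rw [hins, List.filter_cons, List.filter_cons, ih]

-- inserting an element with key c into a key-sorted list appends it to the c-filter
theorem pv_filter_insertBy_eq (x : Int × Int) (c : Int) (acc : List (Int × Int))
    (hs : acc.Pairwise (fun a b => a.1 ≤ b.1)) (hx : x.1 = c) :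
    (PySem.List.insertBy (fun a b : Int × Int => decide (a.1 < b.1)) x acc).filter
        (fun p => p.1 == c)
      = acc.filter (fun p => p.1 == c) ++ [x] := by
  induction acc with
  | nil => simp [PySem.List.insertBy, hx]
  | cons y ys ih =>
    rw [List.pairwise_cons] at hs
    by_cases hlt : x.1 < y.1
    · have hnil : (y :: ys).filter (fun p => p.1 == c) = [] := by
        rw [List.filter_eq_nil_iff]
        intro p hp
        have hyp : y.1 ≤ p.1 := by
          rcases List.mem_cons.mp hp with rfl | hp
          · exact le_refl _
          · exact hs.1 p hp
        have : c < p.1 := by omega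
        simp only [beq_iff_eq]
        omega
      have hins : PySem.List.insertBy (fun a b : Int × Int => decide (a.1 < b.1)) x (y :: ys)
          = x :: y :: ys := by simp [PySem.List.insertBy, hlt]
      rw [hins, List.filter_cons_of_pos (by simpa using hx), hnil]
      simp
    · have hins : PySem.List.insertBy (fun a b : Int × Int => decide (a.1 < b.1)) x (y :: ys)
          = y :: PySem.List.insertBy (fun a b : Int × Int => decide (a.1 < b.1)) x ys := by
        simp [PySem.List.insertBy, hlt]
      rw [hins, List.filter_cons, List.filter_cons, ih hs.2]
      by_cases hy : y.1 = c <;> simp [hy]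

-- filter stability: filtering on one key commutes with the stable key sort
theorem pv_filter_sorted (xs : List (Int × Int)) (c : Int) :
    (PySem.List.sorted xs (fun o => o.1)).filter (fun p => p.1 == c)
      = xs.filter (fun p => p.1 == c) := by
  suffices h : ∀ (l : List (Int × Int)) (acc : List (Int × Int)),
      acc.Pairwise (fun a b => a.1 ≤ b.1) →
      (l.foldl (fun acc x =>
          PySem.List.insertBy (fun a b : Int × Int => decide (a.1 < b.1)) x acc) acc).filter
        (fun p => p.1 == c)
        = acc.filter (fun p => p.1 == c) ++ l.filter (fun p => p.1 == c) by
    have := h xs [] (by simp)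
    rw [PySem.List.sorted_eq_foldl_insertBy xs (fun o => o.1)]
    simpa using this
  intro l
  induction l with
  | nil => simp
  | cons x xs ih =>
    intro acc hacc
    have hpw := PySem.List.insertBy_pairwise_le (fun o : Int × Int => o.1) x acc hacc
    by_cases hx : x.1 = c
    · rw [List.foldl_cons, ih _ hpw, pv_filter_insertBy_eq x c acc hacc hx]
      simp [hx]
    · rw [List.foldl_cons, ih _ hpw, pv_filter_insertBy_ne x c acc hx]
      simp [hx]

-- grouping lemma for B: on a key-sorted list, pvRuns produces the canonical rows,
-- one per distinct key in order of (first) occurrence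
theorem pv_runs_eq (l : List (Int × Int)) (h : l.Pairwise (fun a b => a.1 ≤ b.1)) :
    pvRuns l = (PySem.Set.ofList (l.map (fun p => p.1))).map (pvRow l) := by
  induction l using pvRuns.induct with
  | case1 => rw [pvRuns]; rfl
  | case2 o rest ih =>
    obtain ⟨h1, h2⟩ := List.pairwise_cons.mp h
    have hsplit : rest.takeWhile (fun p => p.1 == o.1) ++ rest.dropWhile (fun p => p.1 == o.1)
        = rest := List.takeWhile_append_dropWhile
    have htk : ∀ p ∈ rest.takeWhile (fun p => p.1 == o.1), p.1 = o.1 := fun p hp => by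
      simpa using List.mem_takeWhile_imp hp
    have hrsub : (rest.dropWhile (fun p => p.1 == o.1)).Sublist rest := List.dropWhile_sublist _
    have hrpw : (rest.dropWhile (fun p => p.1 == o.1)).Pairwise (fun a b => a.1 ≤ b.1) :=
      List.Pairwise.sublist hrsub h2
    have hrgt : ∀ p ∈ rest.dropWhile (fun p => p.1 == o.1), o.1 < p.1 := by
      cases hrc : rest.dropWhile (fun p => p.1 == o.1) with
      | nil => simp
      | cons q r' =>
        have hqhead : (q.1 == o.1) = false := by
          have h2' := List.head_dropWhile_not (fun p : Int × Int => p.1 == o.1) (l := rest)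
            (by simp [hrc])
          simp only [hrc] at h2'
          simpa using h2'
        have hqle : o.1 ≤ q.1 := h1 q (hrsub.mem (by rw [hrc]; simp))
        have hqlt : o.1 < q.1 := by
          simp only [beq_eq_false_iff_ne, ne_eq] at hqhead
          omega
        intro p hp
        rcases List.mem_cons.mp hp with rfl | hp
        · exact hqlt
        · have hq' : q.1 ≤ p.1 := by
            rw [hrc] at hrpw
            exact (List.pairwise_cons.mp hrpw).1 p hp
          omega
    have hrne : o.1 ∉ (rest.dropWhile (fun p => p.1 == o.1)).map (fun p => p.1) := by
      intro hmem
      obtain ⟨p, hp, hpk⟩ := List.mem_map.mp hmem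
      exact absurd (hrgt p hp) (by omega)
    -- the distinct keys of l are o.1 followed by the distinct keys of the dropped rest
    have hkeys : PySem.Set.ofList (((o :: rest).map (fun p => p.1)))
        = o.1 :: PySem.Set.ofList ((rest.dropWhile (fun p => p.1 == o.1)).map (fun p => p.1)) := by
      have h0 : ((o :: rest).map (fun p => p.1))
          = [o.1] ++ ((rest.takeWhile (fun p => p.1 == o.1)).map (fun p => p.1)
              ++ (rest.dropWhile (fun p => p.1 == o.1)).map (fun p => p.1)) := by
        simp [← List.map_append, hsplit]
      rw [h0]
      show PySem.Set.update PySem.Set.empty _ = _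
      rw [PySem.Set.update, List.foldl_append]
      have hado : List.foldl PySem.Set.add PySem.Set.empty [o.1] = [o.1] := rfl
      rw [hado, List.foldl_append]
      have hto : List.foldl PySem.Set.add [o.1]
          ((rest.takeWhile (fun p => p.1 == o.1)).map (fun p => p.1)) = [o.1] := by
        apply pv_update_all_mem
        intro x hx
        obtain ⟨p, hp, hpk⟩ := List.mem_map.mp hx
        simp [← hpk, htk p hp]
      rw [hto]
      exact pv_update_cons_out o.1 _ [] hrne
    have hsplit' : o :: rest = (o :: rest.takeWhile (fun p => p.1 == o.1))
        ++ rest.dropWhile (fun p => p.1 == o.1) := by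
      rw [List.cons_append, hsplit]
    -- head row of l is the first run
    have hhead : pvRow (o :: rest) o.1
        = (o.1, (o :: rest.takeWhile (fun p => p.1 == o.1)).map Prod.snd) := by
      unfold pvRow
      have hfr : (rest.dropWhile (fun p => p.1 == o.1)).filter (fun p => p.1 == o.1) = [] := by
        rw [List.filter_eq_nil_iff]
        intro p hp
        have := hrgt p hp
        simp only [beq_iff_eq]
        omega
      have hft : (o :: rest.takeWhile (fun p => p.1 == o.1)).filter (fun p => p.1 == o.1)
          = o :: rest.takeWhile (fun p => p.1 == o.1) :=
        List.filter_eq_self.mpr (fun p hp => by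
          rcases List.mem_cons.mp hp with rfl | hp
          · simp
          · simp [htk p hp])
      rw [hsplit', List.filter_append, hft, hfr, List.append_nil]
    -- rows of the remaining keys only see the dropped rest
    have htail : ∀ k ∈ PySem.Set.ofList ((rest.dropWhile (fun p => p.1 == o.1)).map (fun p => p.1)),
        pvRow (o :: rest) k = pvRow (rest.dropWhile (fun p => p.1 == o.1)) k := by
      intro k hk
      have hk' : k ∈ (rest.dropWhile (fun p => p.1 == o.1)).map (fun p => p.1) :=
        (PySem.Set.mem_ofList _ _).mp hk
      obtain ⟨p, hp, hpk⟩ := List.mem_map.mp hk'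
      have hko : o.1 < k := hpk ▸ hrgt p hp
      unfold pvRow
      have hfo : ((o :: rest.takeWhile (fun p => p.1 == o.1)).filter (fun p => p.1 == k)) = [] := by
        rw [List.filter_eq_nil_iff]
        intro q hq
        have hqk : q.1 = o.1 := by
          rcases List.mem_cons.mp hq with rfl | hq
          · rfl
          · exact htk q hq
        simp only [beq_iff_eq]
        omega
      rw [hsplit', List.filter_append, hfo, List.nil_append]
    rw [pvRuns, hkeys]
    simp only [List.map_cons]
    rw [hhead, List.map_congr_left htail, ← ih hrpw]
    simp

-- ===== VERDICT (by name: the statement is the Claim_ definition above) =====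
theorem sort_parcels_spec : Claim_equal_sort_parcels := by
  intro orders _
  show sort_parcels orders = sort_parcels_alt orders
  -- notation
  set L := PySem.List.sorted orders (fun o => o.1) with hL
  -- B's side: canonical rows over the distinct keys of the sorted list
  have hB : sort_parcels_alt orders
      = (PySem.Set.ofList (L.map (fun p => p.1))).map (pvRow L) :=
    pv_runs_eq L (PySem.List.sorted_pairwise orders (fun o => o.1))
  -- A's side: the dict's items are the canonical rows over the distinct keys of orders
  have hstep : (fun (d : PySem.Dict Int (List Int)) (o : Int × Int) =>
        if d.contains o.1 then d.modify o.1 [] (fun l => l ++ [o.2])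
        else d.insert o.1 [o.2])
      = (fun d p => d.modify p.1 [] (fun x => x ++ [p.2])) :=
    funext fun d => funext fun o => pv_stepA_eq d o
  have hkeys : (orders.foldl (fun d p => d.modify p.1 [] (fun x => x ++ [p.2]))
        (PySem.Dict.empty : PySem.Dict Int (List Int))).keys
      = PySem.Set.ofList (orders.map (fun p => p.1)) := by
    rw [PySem.Dict.keys_foldl_modify_key orders (fun p => p.1) []
      (fun _ p => fun x => x ++ [p.2]) PySem.Dict.empty]
    rfl
  have hnd : (orders.foldl (fun d p => d.modify p.1 [] (fun x => x ++ [p.2]))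
        (PySem.Dict.empty : PySem.Dict Int (List Int))).keys.Nodup := by
    rw [hkeys]; exact PySem.Set.nodup_ofList _
  have hitems : (orders.foldl (fun d p => d.modify p.1 [] (fun x => x ++ [p.2]))
        (PySem.Dict.empty : PySem.Dict Int (List Int))).items
      = (PySem.Set.ofList (orders.map (fun p => p.1))).map (pvRow orders) := by
    rw [PySem.Dict.items_eq_map_keys _ hnd [], hkeys]
    apply List.map_congr_left
    intro k _
    unfold pvRow
    rw [PySem.Dict.getD_foldl_modify_append orders PySem.Dict.empty k,
      PySem.Dict.getD_empty]
    simp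
  -- the key lists agree up to permutation, and B's is strictly increasing
  have hperm : ((PySem.Set.ofList (L.map (fun p => p.1))).map (pvRow orders)).Perm
      ((PySem.Set.ofList (orders.map (fun p => p.1))).map (pvRow orders)) := by
    apply List.Perm.map
    rw [List.perm_ext_iff_of_nodup (PySem.Set.nodup_ofList _) (PySem.Set.nodup_ofList _)]
    intro k
    rw [PySem.Set.mem_ofList, PySem.Set.mem_ofList]
    constructor <;> intro hk
    · exact ((PySem.List.sorted_perm orders (fun o => o.1) false).map (fun p => p.1)).mem_iff.mp hk
    · exact ((PySem.List.sorted_perm orders (fun o => o.1) false).map (fun p => p.1)).mem_iff.mpr hk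
  have hkeylt : (PySem.Set.ofList (L.map (fun p => p.1))).Pairwise (· < ·) := by
    have hle : (PySem.Set.ofList (L.map (fun p => p.1))).Pairwise (· ≤ ·) := by
      have : (L.map (fun p => p.1)).Pairwise (· ≤ ·) :=
        PySem.List.sorted_map_key_pairwise orders (fun o => o.1)
      exact List.Pairwise.sublist (by simpa using pv_update_sublist (L.map (fun p => p.1)) [])
        this
    have hne : (PySem.Set.ofList (L.map (fun p => p.1))).Pairwise (· ≠ ·) :=
      PySem.Set.nodup_ofList _
    exact (hle.and hne).imp (fun hab => lt_of_le_of_ne hab.1 hab.2)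
  have hrowlt : ((PySem.Set.ofList (L.map (fun p => p.1))).map (pvRow orders)).Pairwise
      (fun a b => a.1 < b.1) := by
    rw [List.pairwise_map]
    exact hkeylt.imp (fun h => h)
  -- A's sort picks out exactly B's order
  have hA : sort_parcels orders
      = (PySem.Set.ofList (L.map (fun p => p.1))).map (pvRow orders) := by
    show PySem.List.sorted
        ((orders.foldl (fun d o =>
          if d.contains o.1 then d.modify o.1 [] (fun l => l ++ [o.2])
          else d.insert o.1 [o.2]) (PySem.Dict.empty : PySem.Dict Int (List Int))).items)
        (fun p => p.1) = _
    rw [hstep, hitems]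
    exact PySem.List.sorted_eq_of_perm_of_pairwise_lt _ _ (fun p => p.1) hperm hrowlt
  -- the rows built from orders and from its stable sort coincide
  rw [hA, hB]
  apply List.map_congr_left
  intro k _
  unfold pvRow
  rw [hL, pv_filter_sorted]
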